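-- pv_equiv track=rewrite | github.com/gustavoperess/Leetcode | Medium/HashTable/2950-NumberofDivisibleSubstrings/NumberofDivisibleSubstrings.py | countDivisibleSubstrings
-- ===== SOURCE A (Python) =====
-- def countDivisibleSubstrings(word: str) -> int:
--     letters = {
--         'a': 1, 'b': 1,
--         'c': 2, 'd': 2, 'e': 2,
--         'f': 3, 'g': 3, 'h': 3,
--         'i': 4, 'j': 4, 'k': 4,
--         'l': 5, 'm': 5, 'n': 5,
--         'o': 6, 'p': 6, 'q': 6,
--         'r': 7, 's': 7, 't': 7,
--         'u': 8, 'v': 8, 'w': 8,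
--         'x': 9, 'y': 9, 'z': 9
--     }
--     ans = 0
--     n = len(word)
--     for i in range(n):
--         total = 0
--         for j in range(i, n):
--             total += letters[word[j]]
--             length = j - i + 1
--             if total % length == 0:
--                 ans += 1
--
--     return ans
-- ===== SOURCE B (Python) =====
-- def countDivisibleSubstrings(word: str) -> int:
--     # For each target average k in 1..9, count subarrays of (value - k) summing to 0
--     # via a prefix-sum hashmap: O(9n) instead of A's O(n^2).
--     vals = [(ord(c) - 96) // 3 + 1 for c in word]
--     ans = 0
--     for k in range(1, 10):
--         seen = {0: 1}
--         p = 0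
--         for v in vals:
--             p += v - k
--             c = seen.get(p, 0)
--             ans += c
--             seen[p] = c + 1
--     return ans
-- ===== Notes on version B (the rewrite author's own statement) =====
-- stated objective: faster
-- what changed: Replaces A's enumeration of all O(n^2) substrings by, for each candidate average k in 1..9, a single prefix-sum pass counting zero-sum subarrays of (value-k) with a hashmap.
import Mathlib
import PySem

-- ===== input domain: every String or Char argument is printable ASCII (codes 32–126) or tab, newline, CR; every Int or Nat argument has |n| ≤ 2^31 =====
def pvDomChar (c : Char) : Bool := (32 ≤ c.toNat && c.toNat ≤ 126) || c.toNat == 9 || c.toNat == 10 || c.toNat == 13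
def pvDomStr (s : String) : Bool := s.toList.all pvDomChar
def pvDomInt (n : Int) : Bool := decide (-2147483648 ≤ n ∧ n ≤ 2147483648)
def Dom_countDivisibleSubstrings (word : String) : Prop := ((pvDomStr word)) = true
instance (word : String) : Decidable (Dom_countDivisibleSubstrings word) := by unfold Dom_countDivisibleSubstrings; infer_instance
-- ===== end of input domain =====

-- B replaces A's O(n^2) substring enumeration by nine prefix-sum hashmap passes (one per
-- candidate average 1..9), counting zero-sum subarrays of (value - k): asymptotically faster.

-- ===== PORT A =====
def pvLetters : PySem.Dict Char Int :=
  PySem.Dict.ofList [('a',1),('b',1),('c',2),('d',2),('e',2),('f',3),('g',3),('h',3),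
    ('i',4),('j',4),('k',4),('l',5),('m',5),('n',5),('o',6),('p',6),('q',6),
    ('r',7),('s',7),('t',7),('u',8),('v',8),('w',8),('x',9),('y',9),('z',9)]

-- literal port of A: for i in range(n): total = 0; for j in range(i, n): total += letters[word[j]]; …
-- letters[word[j]] raises KeyError outside 'a'..'z'; Pre_ excludes those inputs (getD defaults are never hit inside Pre_).
def countDivisibleSubstrings (word : String) : Int :=
  let n : Int := PySem.Str.len word
  (PySem.List.pyRange 0 n).foldl (fun ans i =>
    ((PySem.List.pyRange i n).foldl (fun (st : Int × Int) j =>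
        let total := st.1 + ((pvLetters.get? ((PySem.Str.pyGet? word j).getD ' ')).getD 0)
        let length := j - i + 1
        (total, if PySem.Int.mod total length == 0 then st.2 + 1 else st.2))
      (0, ans)).2) 0

-- ===== PORT B =====
-- literal port of Source B: vals = [(ord(c)-96)//3+1 …]; for k in range(1,10): seen = {0:1}; p = 0;
-- for v in vals: p += v-k; c = seen.get(p,0); ans += c; seen[p] = c+1
def countDivisibleSubstrings_alt (word : String) : Int :=
  let vals := word.toList.map (fun c => PySem.Int.floordiv ((c.toNat : Int) - 96) 3 + 1)
  (PySem.List.pyRange 1 10).foldl (fun ans k =>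
    (vals.foldl (fun (st : PySem.Dict Int Int × Int × Int) v =>
        let p := st.2.1 + (v - k)
        let c := st.1.getD p 0
        (st.1.insert p (c + 1), p, st.2.2 + c))
      (PySem.Dict.ofList [(0, 1)], 0, ans)).2.2) 0

-- ===== PRECONDITION & SPEC =====
-- Pre_ excludes exactly the inputs containing a character outside 'a'..'z', on which A
-- raises KeyError (letters[word[j]]).
def Pre_countDivisibleSubstrings (word : String) : Prop :=
  (word.toList.all (fun c => c ∈ ['a','b','c','d','e','f','g','h','i','j','k','l','m',
    'n','o','p','q','r','s','t','u','v','w','x','y','z'])) = true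
instance (word : String) : Decidable (Pre_countDivisibleSubstrings word) := by
  unfold Pre_countDivisibleSubstrings; infer_instance

def pvWitness_countDivisibleSubstrings : String := "asdf"

def Spec_countDivisibleSubstrings (word : String) (out : Int) : Prop := out = countDivisibleSubstrings_alt word
instance (word : String) (out : Int) : Decidable (Spec_countDivisibleSubstrings word out) := by unfold Spec_countDivisibleSubstrings; infer_instance

-- ===== CLAIM (what is proved, stated in full; the proofs are below) =====
def Claim_equal_countDivisibleSubstrings : Prop := ∀ (word : String), Dom_countDivisibleSubstrings word → Pre_countDivisibleSubstrings word → Spec_countDivisibleSubstrings word (countDivisibleSubstrings word)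

-- ===== LEMMAS AND PROOFS =====

-- letter value used by B, as a function of the character
def pvVal (c : Char) : Int := PySem.Int.floordiv ((c.toNat : Int) - 96) 3 + 1

-- prefix sum of the first m values
def pvS (vs : List Int) (m : Nat) : Int := ((vs.take m).sum)

-- A's inner loop, abstracted: g l t m counts nonempty prefixes p of l with (m-1+|p|) ∣ (t+Σp)
def pvG : List Int → Int → Int → Int
  | [], _, _ => 0
  | v :: l, t, m => (if m ∣ (t + v) then 1 else 0) + pvG l (t + v) (m + 1)

-- B's inner loop, abstracted over the list of earlier prefix values
def pvBC (k : Int) : List Int → Int → List Int → Int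
  | _, _, [] => 0
  | qs, p, v :: l => (qs.count (p + (v - k)) : Int) + pvBC k (qs ++ [p + (v - k)]) (p + (v - k)) l

-- B's prefix value at index u for average k
def pvD (k : Int) (vs : List Int) (u : Nat) : Int := pvS vs u - k * u

theorem pvVal_eq_letters (c : Char)
    (h : c ∈ ['a','b','c','d','e','f','g','h','i','j','k','l','m',
      'n','o','p','q','r','s','t','u','v','w','x','y','z']) :
    (pvLetters.get? c).getD 0 = pvVal c := by
  simp only [List.mem_cons, List.not_mem_nil, or_false] at h
  rcases h with rfl|rfl|rfl|rfl|rfl|rfl|rfl|rfl|rfl|rfl|rfl|rfl|rfl|rfl|rfl|rfl|rfl|rfl|rfl|rfl|rfl|rfl|rfl|rfl|rfl|rfl <;> decide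

theorem pvVal_bounds (c : Char)
    (h : c ∈ ['a','b','c','d','e','f','g','h','i','j','k','l','m',
      'n','o','p','q','r','s','t','u','v','w','x','y','z']) :
    1 ≤ pvVal c ∧ pvVal c ≤ 9 := by
  simp only [List.mem_cons, List.not_mem_nil, or_false] at h
  rcases h with rfl|rfl|rfl|rfl|rfl|rfl|rfl|rfl|rfl|rfl|rfl|rfl|rfl|rfl|rfl|rfl|rfl|rfl|rfl|rfl|rfl|rfl|rfl|rfl|rfl|rfl <;> exact ⟨by decide, by decide⟩

-- ---------- A side ----------

theorem pv_sum_range_list (f : Nat → Int) (N : Nat) :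
    ∑ i ∈ Finset.range N, f i = ((List.range N).map f).sum := by
  induction N with
  | zero => simp
  | succ n ih => rw [Finset.sum_range_succ, List.range_succ]; simp [ih]



theorem pvA_inner (word : String) (L : List Int)
    (hL : L = word.toList.map (fun c => (pvLetters.get? c).getD 0)) :
    ∀ (m : Nat) (jn : Nat) (i t a : Int), jn + m = L.length →
    ((PySem.List.pyRange (jn : Int) (L.length : Int)).foldl (fun (st : Int × Int) j =>
        let total := st.1 + ((pvLetters.get? ((PySem.Str.pyGet? word j).getD ' ')).getD 0)
        let length := j - i + 1
        (total, if PySem.Int.mod total length == 0 then st.2 + 1 else st.2))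
      (t, a)) = (t + (L.drop jn).sum, a + pvG (L.drop jn) t ((jn : Int) - i + 1)) := by
  intro m
  induction m with
  | zero =>
    intro jn i t a hlen
    have : jn = L.length := by omega
    subst this
    simp [PySem.List.pyRange, pvG]
  | succ m ih =>
    intro jn i t a hlen
    have hjn : jn < L.length := by omega
    have hjw : jn < word.toList.length := by
      rw [hL, List.length_map] at hjn; exact hjn
    rw [PySem.List.pyRange_one_cons (by exact_mod_cast hjn)]
    rw [List.foldl_cons]
    have hget : (PySem.Str.pyGet? word (jn : Int)).getD ' ' = word.toList[jn] := by
      rw [PySem.Str.pyGet?_natCast, List.getElem?_eq_getElem hjw]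
      rfl
    have hw : ((pvLetters.get? ((PySem.Str.pyGet? word (jn : Int)).getD ' ')).getD 0) = L[jn] := by
      subst hL
      rw [hget]
      simp
    simp only [hw]
    have hcast : ((jn : Int) + 1) = ((jn + 1 : Nat) : Int) := by push_cast; ring
    rw [hcast, ih (jn + 1) i (t + L[jn])
      (if PySem.Int.mod (t + L[jn]) ((jn : Int) - i + 1) == 0 then a + 1 else a) (by omega)]
    rw [List.drop_eq_getElem_cons hjn, pvG]
    have hm1 : ((jn + 1 : Nat) : Int) - i + 1 = ((jn : Int) - i + 1) + 1 := by push_cast; ring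
    rw [hm1]
    rw [Prod.mk.injEq]
    constructor
    · rw [List.sum_cons]; ring
    · by_cases hc : ((jn : Int) - i + 1) ∣ (t + L[jn])
      · have hb : (PySem.Int.mod (t + L[jn]) ((jn : Int) - i + 1) == 0) = true := by
          rw [beq_iff_eq, PySem.Int.mod_eq_zero_iff_dvd]; exact hc
        rw [hb, if_pos rfl, if_pos hc]
        ring
      · have hb : (PySem.Int.mod (t + L[jn]) ((jn : Int) - i + 1) == 0) = false := by
          rw [beq_eq_false_iff_ne, Ne, PySem.Int.mod_eq_zero_iff_dvd]; exact hc
        rw [hb]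
        simp [hc]

theorem pvA_eq_sum (word : String) (L : List Int)
    (hL : L = word.toList.map (fun c => (pvLetters.get? c).getD 0)) :
    countDivisibleSubstrings word =
      ∑ m ∈ Finset.range L.length, pvG (L.drop m) 0 1 := by
  have hlen : PySem.Str.len word = (L.length : Int) := by
    rw [hL, List.length_map]
    simp [PySem.Str.len_eq]
  unfold countDivisibleSubstrings
  simp only [hlen]
  rw [PySem.List.pyRange_zero_natCast, List.foldl_map]
  refine Eq.trans (PySem.List.foldl_congr_mem _ _
      (fun ans iN => ans + pvG (L.drop iN) 0 1) 0 ?_) ?_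
  · intro acc x hx
    have hxn : x < L.length := List.mem_range.mp hx
    simp only
    rw [pvA_inner word L hL (L.length - x) x (x : Int) 0 acc (by omega)]
    simp
  · rw [PySem.List.foldl_add, ← pv_sum_range_list]
    simp

theorem pvG_spec : ∀ (l : List Int) (t m : Int),
    pvG l t m = ∑ d ∈ Finset.range l.length,
      (if (m + d) ∣ (t + (l.take (d + 1)).sum) then (1 : Int) else 0) := by
  intro l
  induction l with
  | nil => intro t m; simp [pvG]
  | cons v l ih =>
    intro t m
    rw [pvG, ih (t + v) (m + 1)]
    rw [show (v :: l).length = l.length + 1 from rfl, Finset.sum_range_succ']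
    rw [add_comm]
    congr 1
    · apply Finset.sum_congr rfl
      intro d _
      have e1 : m + 1 + (d : Int) = m + ((d : Int) + 1) := by ring
      have e2 : t + v + (l.take (d + 1)).sum = t + ((v :: l).take (d + 1 + 1)).sum := by
        simp [List.take_succ_cons]; ring
      rw [e1, e2]
      norm_cast
    · simp

-- ---------- B side ----------

theorem pvB_inner (k : Int) : ∀ (l : List Int) (d : PySem.Dict Int Int) (qs : List Int) (p a : Int),
    (∀ x : Int, d.getD x 0 = (qs.count x : Int)) →
    ((l.foldl (fun (st : PySem.Dict Int Int × Int × Int) v =>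
        let p := st.2.1 + (v - k)
        let c := st.1.getD p 0
        (st.1.insert p (c + 1), p, st.2.2 + c)) (d, p, a)).2.2) = a + pvBC k qs p l := by
  intro l
  induction l with
  | nil => intro d qs p a h; simp [pvBC]
  | cons v l ih =>
    intro d qs p a h
    rw [List.foldl_cons, pvBC]
    have hnew : ∀ x : Int, (d.insert (p + (v - k)) (d.getD (p + (v - k)) 0 + 1)).getD x 0
        = (((qs ++ [p + (v - k)]).count x : Nat) : Int) := by
      intro x
      rw [PySem.Dict.getD_insert, List.count_append, List.count_singleton]
      by_cases hx : x = p + (v - k)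
      · simp [hx, h]
      · simp [hx, h]
        exact fun hc => hx hc.symm
    have := ih (d.insert (p + (v - k)) (d.getD (p + (v - k)) 0 + 1)) (qs ++ [p + (v - k)]) (p + (v - k)) (a + d.getD (p + (v - k)) 0) hnew
    simp only at this ⊢
    rw [this, h]
    ring

theorem pvBC_spec (k : Int) : ∀ (l qs : List Int) (p : Int),
    pvBC k qs p l = ∑ t ∈ Finset.range l.length,
      ((qs ++ (List.range t).map (fun u => p + pvD k l (u + 1))).count (p + pvD k l (t + 1)) : Int) := by
  intro l
  induction l with
  | nil => intro qs p; simp [pvBC]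
  | cons v l ih =>
    intro qs p
    rw [pvBC, ih (qs ++ [p + (v - k)]) (p + (v - k))]
    have fact1 : ∀ u : Nat, p + (v - k) + pvD k l u = p + pvD k (v :: l) (u + 1) := by
      intro u
      simp only [pvD, pvS, List.take_succ_cons, List.sum_cons]
      push_cast
      ring
    rw [show (v :: l).length = l.length + 1 from rfl, Finset.sum_range_succ']
    rw [add_comm]
    congr 1
    · apply Finset.sum_congr rfl
      intro t _
      have hval : p + (v - k) + pvD k l (t + 1) = p + pvD k (v :: l) (t + 1 + 1) := fact1 (t + 1)
      have hlist : (qs ++ [p + (v - k)]) ++ (List.range t).map (fun u => p + (v - k) + pvD k l (u + 1))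
          = qs ++ (List.range (t + 1)).map (fun u => p + pvD k (v :: l) (u + 1)) := by
        rw [List.range_succ_eq_map, List.append_assoc]
        congr 1
        simp only [List.map_cons, List.map_map]
        rw [List.singleton_append]
        congr 1
        · have := fact1 0
          simp only [pvD, pvS, List.take_zero, List.sum_nil] at this ⊢
          omega
        · refine List.map_congr_left ?_
          intro u _
          exact fact1 (u + 1)
      rw [hval, hlist]
    · have h1 : p + pvD k (v :: l) (0 + 1) = p + (v - k) := by
        simp [pvD, pvS, List.take_succ_cons]
      rw [h1]
      simp

theorem pv_dict0 (x : Int) :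
    (PySem.Dict.ofList [((0 : Int), (1 : Int))]).getD x 0 = (List.count x [(0 : Int)] : Int) := by
  by_cases h : x = 0
  · simp [h, PySem.Dict.ofList, PySem.Dict.getD, PySem.Dict.get?, PySem.Dict.update,
      PySem.Dict.empty, PySem.Dict.insert]
  · have h' : ¬ ((0 : Int) = x) := fun e => h e.symm
    simp [h', PySem.Dict.ofList, PySem.Dict.getD, PySem.Dict.get?, PySem.Dict.update,
      PySem.Dict.empty, PySem.Dict.insert]

theorem pvBC_to_sum (k' : Int) (L : List Int) :
    pvBC k' [0] 0 L = ∑ t ∈ Finset.range L.length, ∑ m ∈ Finset.range (t + 1),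
      (if pvD k' L m = pvD k' L (t + 1) then (1 : Int) else 0) := by
  rw [pvBC_spec]
  apply Finset.sum_congr rfl
  intro t _
  simp only [zero_add, List.singleton_append]
  have hmap : (0 : Int) :: (List.range t).map (fun u => pvD k' L (u + 1))
      = (List.range (t + 1)).map (pvD k' L) := by
    rw [List.range_succ_eq_map]
    simp only [List.map_cons, List.map_map]
    congr 1
    · simp [pvD, pvS]
  rw [hmap, List.count_eq_countP, List.countP_map]
  rw [pv_sum_range_list]
  have hform : (List.map (fun m => if pvD k' L m = pvD k' L (t + 1) then (1 : Int) else 0)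
        (List.range (t + 1)))
      = List.map (fun m => if ((fun x => x == pvD k' L (t + 1)) ∘ pvD k' L) m = true then (1 : Int) else 0)
        (List.range (t + 1)) := by
    apply List.map_congr_left
    intro m _
    simp
  rw [hform, PySem.List.sum_map_ite_one_zero]

theorem pvB_eq_sum (word : String) (L : List Int)
    (hL : L = word.toList.map pvVal) :
    countDivisibleSubstrings_alt word =
      ∑ k ∈ Finset.range 9, ∑ t ∈ Finset.range L.length, ∑ m ∈ Finset.range (t + 1),
        (if pvD ((k : Int) + 1) L m = pvD ((k : Int) + 1) L (t + 1) then (1 : Int) else 0) := by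
  have hvals : word.toList.map (fun c => PySem.Int.floordiv ((c.toNat : Int) - 96) 3 + 1) = L := by
    rw [hL]; rfl
  unfold countDivisibleSubstrings_alt
  simp only [hvals]
  rw [show PySem.List.pyRange 1 10 = [1, 2, 3, 4, 5, 6, 7, 8, 9] from rfl]
  have hg : ∀ (a k : Int),
      ((L.foldl (fun (st : PySem.Dict Int Int × Int × Int) v =>
        let p := st.2.1 + (v - k)
        let c := st.1.getD p 0
        (st.1.insert p (c + 1), p, st.2.2 + c))
      (PySem.Dict.ofList [(0, 1)], 0, a)).2.2) = a + pvBC k [0] 0 L := by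
    intro a k
    exact pvB_inner k L _ [0] 0 a pv_dict0
  simp only [List.foldl_cons, List.foldl_nil, hg]
  simp only [pvBC_to_sum]
  rw [show (9 : Nat) = 8 + 1 from rfl]
  simp only [Finset.sum_range_succ, Finset.sum_range_zero]
  norm_num

-- ---------- combinatorial core ----------

theorem pv_sum_bounds : ∀ (l : List Int), (∀ v ∈ l, 1 ≤ v ∧ v ≤ 9) →
    (l.length : Int) ≤ l.sum ∧ l.sum ≤ 9 * l.length := by
  intro l h
  induction l with
  | nil => simp
  | cons v l ih =>
    have hv := h v (List.mem_cons_self)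
    have ih' := ih (fun w hw => h w (List.mem_cons_of_mem _ hw))
    simp only [List.sum_cons, List.length_cons]
    push_cast
    constructor <;> nlinarith [ih'.1, ih'.2, hv.1, hv.2]

theorem pv_dvd_expand (s d : Int) (h1 : 1 ≤ d) (h2 : d ≤ s) (h3 : s ≤ 9 * d) :
    (if d ∣ s then (1 : Int) else 0) =
      ∑ k ∈ Finset.range 9, (if s = ((k : Int) + 1) * d then (1 : Int) else 0) := by
  by_cases hd : d ∣ s
  · obtain ⟨q, hq⟩ := hd
    have h1q : 1 ≤ q := by nlinarith
    have h9q : q ≤ 9 := by nlinarith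
    rw [if_pos ⟨q, hq⟩]
    have hrw : ∀ k ∈ Finset.range 9, (if s = ((k : Int) + 1) * d then (1 : Int) else 0)
        = (if k = q.toNat - 1 then (1 : Int) else 0) := by
      intro k hk
      simp only [Finset.mem_range] at hk
      by_cases hkq : k = q.toNat - 1
      · subst hkq
        rw [if_pos rfl, if_pos]
        rw [hq]
        have : ((q.toNat - 1 : Nat) : Int) + 1 = q := by omega
        rw [this]; ring
      · rw [if_neg hkq, if_neg]
        intro hcon
        apply hkq
        have hcancel : ((k : Int) + 1) * d = q * d := by rw [← hcon, hq]; ring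
        have : (k : Int) + 1 = q := mul_right_cancel₀ (by omega) hcancel
        omega
    rw [Finset.sum_congr rfl hrw, Finset.sum_ite_eq' (Finset.range 9) (q.toNat - 1) (fun _ => (1:Int))]
    rw [if_pos]
    simp only [Finset.mem_range]
    omega
  · rw [if_neg hd]
    symm
    apply Finset.sum_eq_zero
    intro k _
    rw [if_neg]
    intro hcon
    exact hd ⟨(k : Int) + 1, by rw [hcon]; ring⟩

theorem pv_main (L : List Int) (hb : ∀ v ∈ L, 1 ≤ v ∧ v ≤ 9) :
    (∑ m ∈ Finset.range L.length, pvG (L.drop m) 0 1) =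
      ∑ k ∈ Finset.range 9, ∑ t ∈ Finset.range L.length, ∑ m ∈ Finset.range (t + 1),
        (if pvD ((k : Int) + 1) L m = pvD ((k : Int) + 1) L (t + 1) then (1 : Int) else 0) := by
  have hstep1 : (∑ m ∈ Finset.range L.length, pvG (L.drop m) 0 1) =
      ∑ m ∈ Finset.range L.length, ∑ d ∈ Finset.range (L.length - m), ∑ k ∈ Finset.range 9,
        (if pvS L (m + d + 1) - pvS L m = ((k : Int) + 1) * ((d : Int) + 1) then (1 : Int) else 0) := by
    apply Finset.sum_congr rfl
    intro m hm
    have hm' : m < L.length := Finset.mem_range.mp hm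
    rw [pvG_spec, List.length_drop]
    apply Finset.sum_congr rfl
    intro d hd
    have hd' : d < L.length - m := Finset.mem_range.mp hd
    have hseg : ((L.drop m).take (d + 1)).sum = pvS L (m + d + 1) - pvS L m := by
      have h1 : pvS L (m + (d + 1)) = pvS L m + ((L.drop m).take (d + 1)).sum := by
        simp [pvS, List.take_add]
      have hmd : m + d + 1 = m + (d + 1) := by omega
      rw [hmd, h1]; ring
    have hlenseg : ((L.drop m).take (d + 1)).length = d + 1 := by
      rw [List.length_take, List.length_drop]; omega
    have hbseg : ∀ v ∈ (L.drop m).take (d + 1), 1 ≤ v ∧ v ≤ 9 := by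
      intro v hv
      exact hb v (List.mem_of_mem_drop (List.mem_of_mem_take hv))
    have hbounds := pv_sum_bounds _ hbseg
    rw [hlenseg] at hbounds
    have hcond : (1 + (d : Int)) = ((d : Int) + 1) := by ring
    rw [zero_add, hseg, hcond]
    refine pv_dvd_expand _ _ (by omega) ?_ ?_
    · have := hbounds.1; push_cast at this ⊢; omega
    · have := hbounds.2; push_cast at this ⊢; omega
  rw [hstep1]
  have hstep2 : ∀ k : Nat,
      (∑ t ∈ Finset.range L.length, ∑ m ∈ Finset.range (t + 1),
        (if pvD ((k : Int) + 1) L m = pvD ((k : Int) + 1) L (t + 1) then (1 : Int) else 0)) =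
      ∑ m ∈ Finset.range L.length, ∑ d ∈ Finset.range (L.length - m),
        (if pvS L (m + d + 1) - pvS L m = ((k : Int) + 1) * ((d : Int) + 1) then (1 : Int) else 0) := by
    intro k
    have hF : ∀ (m j : Nat),
        ((if pvD ((k : Int) + 1) L m = pvD ((k : Int) + 1) L j then (1 : Int) else 0)
          = (if pvS L j - pvS L m = ((k : Int) + 1) * ((j : Int) - (m : Int)) then (1 : Int) else 0)) := by
      intro m j
      congr 1
      simp only [pvD, eq_iff_iff]
      constructor <;> intro h <;> nlinarith [h]
    calc (∑ t ∈ Finset.range L.length, ∑ m ∈ Finset.range (t + 1),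
          (if pvD ((k : Int) + 1) L m = pvD ((k : Int) + 1) L (t + 1) then (1 : Int) else 0))
        = ∑ t ∈ Finset.range L.length, ∑ m ∈ Finset.range L.length,
          (if m ≤ t then (if pvD ((k : Int) + 1) L m = pvD ((k : Int) + 1) L (t + 1) then (1 : Int) else 0) else 0) := by
          apply Finset.sum_congr rfl
          intro t ht
          have ht' : t < L.length := Finset.mem_range.mp ht
          have hfil : Finset.filter (fun m => m ≤ t) (Finset.range L.length) = Finset.range (t + 1) := by
            ext m
            simp only [Finset.mem_filter, Finset.mem_range]
            omega
          conv_rhs => rw [← Finset.sum_filter]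
          rw [hfil]
      _ = ∑ m ∈ Finset.range L.length, ∑ t ∈ Finset.range L.length,
          (if m ≤ t then (if pvD ((k : Int) + 1) L m = pvD ((k : Int) + 1) L (t + 1) then (1 : Int) else 0) else 0) := Finset.sum_comm
      _ = ∑ m ∈ Finset.range L.length, ∑ d ∈ Finset.range (L.length - m),
          (if pvS L (m + d + 1) - pvS L m = ((k : Int) + 1) * ((d : Int) + 1) then (1 : Int) else 0) := by
          apply Finset.sum_congr rfl
          intro m hm
          have hfil : Finset.filter (fun t => m ≤ t) (Finset.range L.length) = Finset.Ico m L.length := by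
            ext t
            simp only [Finset.mem_filter, Finset.mem_range, Finset.mem_Ico]
            omega
          conv_lhs => rw [← Finset.sum_filter]
          rw [hfil, Finset.sum_Ico_eq_sum_range]
          apply Finset.sum_congr rfl
          intro d hd
          rw [hF m (m + d + 1)]
          have : ((m + d + 1 : Nat) : Int) - (m : Int) = ((d : Int) + 1) := by push_cast; ring
          rw [this]
  simp only [hstep2]
  rw [Finset.sum_comm]
  apply Finset.sum_congr rfl
  intro m _
  rw [Finset.sum_comm]

-- ===== VERDICT (by name: the statement is the Claim_ definition above) =====
theorem countDivisibleSubstrings_spec : Claim_equal_countDivisibleSubstrings := by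
  intro word _ hpre
  unfold Spec_countDivisibleSubstrings
  set L := word.toList.map pvVal with hL
  have hmap : word.toList.map (fun c => (pvLetters.get? c).getD 0) = L := by
    rw [hL]
    refine List.map_congr_left ?_
    intro c hc
    have := (List.all_eq_true.mp hpre) c hc
    exact pvVal_eq_letters c (by simpa using this)
  have hb : ∀ v ∈ L, 1 ≤ v ∧ v ≤ 9 := by
    intro v hv
    rw [hL] at hv
    obtain ⟨c, hc, rfl⟩ := List.mem_map.mp hv
    exact pvVal_bounds c (by simpa using (List.all_eq_true.mp hpre) c hc)
  rw [pvA_eq_sum word L hmap.symm, pvB_eq_sum word L hL, pv_main L hb]
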